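-- pv_equiv track=rewrite | github.com/gahjelle/advent_of_code | python/src/2017/15_dueling_generators/aoc201715_generators.py | part2
-- ===== SOURCE A (Python) =====
-- def part2(generators, comparer=65_535, num_rounds=5_000_000):
--     """Solve part 2."""
--     seed_a, seed_b = generators
--     return sum(
--         (gen_a & comparer) == (gen_b & comparer)
--         for gen_a, gen_b, _ in zip(
--             restricted_generator(seed_a, factor=16807, multiple=4),
--             restricted_generator(seed_b, factor=48271, multiple=8),
--             range(num_rounds),
--         )
--     )
--
-- def restricted_generator(seed, factor, multiple=1, divisor=2_147_483_647):
--     """Generate consecutive numbers.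
--
--     The generators still generate values in the same way, but now they only hand
--     a value to the judge when it meets a criteria. Each generator looks for
--     values that are multiples of some number.
--     """
--     mask = multiple * 2 - 1  # Because the multiples are of the form 2^n
--     while True:
--         seed = (seed * factor) % divisor
--         masked = seed & mask
--         if masked == 0 or masked == multiple:
--             yield seed
-- ===== SOURCE B (Python) =====
-- def part2(generators, comparer=65_535, num_rounds=5_000_000):
--     """Solve part 2 by cycle detection: memoise pair states with prefix counts and
--     fast-forward over the detected period instead of replaying every round."""
--     def step(a, b):
--         a = a * 16807 % 2147483647
--         while a % 4:
--             a = a * 16807 % 2147483647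
--         b = b * 48271 % 2147483647
--         while b % 8:
--             b = b * 48271 % 2147483647
--         return a, b
--
--     state = tuple(generators)
--     seen = {}
--     counts = [0]
--     i = 0
--     while i < num_rounds:
--         if state in seen:
--             mu = seen[state]
--             lam = i - mu
--             q, r = divmod(num_rounds - i, lam)
--             return counts[i] + q * (counts[i] - counts[mu]) + counts[mu + r] - counts[mu]
--         seen[state] = i
--         state = step(*state)
--         a, b = state
--         counts.append(counts[i] + ((a & comparer) == (b & comparer)))
--         i += 1
--     return counts[i]
-- ===== Notes on version B (the rewrite author's own statement) =====
-- stated objective: alternative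
-- what changed: Replaced A's zip-and-sum over two filter generators by cycle detection: memoise each pair state with its round index and prefix match count in a dict, and on the first repeated state fast-forward arithmetically (q full periods plus a remainder looked up in the prefix-count table) instead of replaying the remaining rounds.
import Mathlib
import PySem

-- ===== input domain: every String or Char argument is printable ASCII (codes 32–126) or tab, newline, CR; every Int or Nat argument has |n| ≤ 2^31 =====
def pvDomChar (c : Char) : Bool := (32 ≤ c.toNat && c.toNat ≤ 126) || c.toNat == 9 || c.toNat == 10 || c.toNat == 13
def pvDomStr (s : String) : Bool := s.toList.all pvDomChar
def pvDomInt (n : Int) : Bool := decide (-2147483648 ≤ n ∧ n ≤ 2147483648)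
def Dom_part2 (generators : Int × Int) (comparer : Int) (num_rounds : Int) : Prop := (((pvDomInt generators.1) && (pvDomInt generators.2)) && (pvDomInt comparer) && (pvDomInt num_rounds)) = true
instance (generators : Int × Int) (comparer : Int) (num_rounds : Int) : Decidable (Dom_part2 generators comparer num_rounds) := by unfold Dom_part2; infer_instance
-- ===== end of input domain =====

-- B replaces A's zip-and-sum over two filter generators by cycle detection: it memoises
-- every pair state with its round index and prefix match count, and on the first repeated
-- state fast-forwards arithmetically over the period; objective: alternative algorithm.

-- ===== PORT A =====
-- restricted_generator's `while True` advances until the mask test accepts; the Python loop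
-- always terminates (the LCG orbit hits a multiple of `multiple`), so the fuel 2^31+1,
-- larger than the orbit length, is never exhausted on inputs where A returns.
def nextFiltered (fuel : Nat) (seed factor multiple : Int) : Int :=
  match fuel with
  | 0 => seed
  | f + 1 =>
    let s := PySem.Int.mod (seed * factor) 2147483647
    let masked := PySem.Int.band s (multiple * 2 - 1)
    if masked = 0 ∨ masked = multiple then s else nextFiltered f s factor multiple

-- the first n values a restricted_generator yields (what zip with range(n) consumes);
-- accumulator form so that evaluation is stack-safe
def genTakeAux (n : Nat) (seed factor multiple : Int) (acc : List Int) : List Int :=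
  match n with
  | 0 => acc.reverse
  | k + 1 =>
    let s := nextFiltered 2147483648 seed factor multiple
    genTakeAux k s factor multiple (s :: acc)

def genTake (n : Nat) (seed factor multiple : Int) : List Int :=
  genTakeAux n seed factor multiple []

def part2 (generators : Int × Int) (comparer : Int) (num_rounds : Int) : Int :=
  let gens_a := genTake num_rounds.toNat generators.1 16807 4
  let gens_b := genTake num_rounds.toNat generators.2 48271 8
  (List.zip gens_a gens_b).foldl
    (fun acc p => acc + (if PySem.Int.band p.1 comparer = PySem.Int.band p.2 comparer then 1 else 0)) 0

-- ===== PORT B =====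
-- Source B's inner `while seed % multiple: seed = seed * factor % 2147483647` (same fuel remark as in port A)
def bSkip (fuel : Nat) (s factor multiple : Int) : Int :=
  match fuel with
  | 0 => s
  | f + 1 =>
    if PySem.Int.mod s multiple = 0 then s
    else bSkip f (PySem.Int.mod (s * factor) 2147483647) factor multiple

-- Source B's nested helper `step(a, b)`
def bStep (st : Int × Int) : Int × Int :=
  (bSkip 2147483647 (PySem.Int.mod (st.1 * 16807) 2147483647) 16807 4,
   bSkip 2147483647 (PySem.Int.mod (st.2 * 48271) 2147483647) 48271 8)

-- Source B's `while i < num_rounds` loop: `rem` counts the remaining rounds (i + rem = n).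
-- `seen` is the state→index dict and `counts` the prefix-count list: ported as Std.HashMap
-- and Array (O(1) lookup/append, the costs of Python's dict and list); list indices taken by
-- the Python are provably in range (0 ≤ mu < i, 0 ≤ mu + r ≤ i < counts.size), so `getD` is exact
def loopB (comparer : Int) (n : Nat) (rem i : Nat) (st : Int × Int)
    (seen : Std.HashMap (Int × Int) Int) (counts : Array Int) : Int :=
  match rem with
  | 0 => counts.getD i 0
  | rem' + 1 =>
    match seen[st]? with
    | some mu =>
      let lam : Int := (i : Int) - mu
      match PySem.Int.divmod? ((n : Int) - (i : Int)) lam with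
      | some (q, r) =>
        counts.getD i 0 + q * (counts.getD i 0 - counts.getD mu.toNat 0)
          + counts.getD (mu + r).toNat 0 - counts.getD mu.toNat 0
      | none => 0  -- unreachable: lam > 0 whenever the lookup succeeds (dict invariant)
    | none =>
      let st' := bStep st
      loopB comparer n rem' (i + 1) st' (seen.insert st (i : Int))
        (counts.push (counts.getD i 0 +
          (if PySem.Int.band st'.1 comparer = PySem.Int.band st'.2 comparer then 1 else 0)))

def part2_alt (generators : Int × Int) (comparer : Int) (num_rounds : Int) : Int :=
  loopB comparer num_rounds.toNat num_rounds.toNat 0 generators ∅ #[0]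

-- ===== PRECONDITION & SPEC =====
def Spec_part2 (generators : Int × Int) (comparer : Int) (num_rounds : Int) (out : Int) : Prop := out = part2_alt generators comparer num_rounds
instance (generators : Int × Int) (comparer : Int) (num_rounds : Int) (out : Int) : Decidable (Spec_part2 generators comparer num_rounds out) := by unfold Spec_part2; infer_instance

-- ===== CLAIM (what is proved, stated in full; the proofs are below) =====
def Claim_equal_part2 : Prop := ∀ (generators : Int × Int) (comparer : Int) (num_rounds : Int), Dom_part2 generators comparer num_rounds → Spec_part2 generators comparer num_rounds (part2 generators comparer num_rounds)

-- ===== LEMMAS AND PROOFS =====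

-- proof-side: A's computation as a per-round loop over bStep, and its prefix counts
def countLoop (comparer : Int) (k : Nat) (st : Int × Int) (c : Int) : Int :=
  match k with
  | 0 => c
  | k' + 1 =>
    let st' := bStep st
    countLoop comparer k' st'
      (c + if PySem.Int.band st'.1 comparer = PySem.Int.band st'.2 comparer then 1 else 0)

def Sst (st0 : Int × Int) (k : Nat) : Int × Int := bStep^[k] st0

def Cc (comparer : Int) (st0 : Int × Int) (k : Nat) : Int := countLoop comparer k st0 0

-- the mask test `s & (2m-1) ∈ {0, m}` is divisibility by m, for m = 4 or 8 and s ≥ 0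
theorem mask_iff_mod (s multiple : Int) (h : 0 ≤ s) (hm : multiple = 4 ∨ multiple = 8) :
    (PySem.Int.band s (multiple * 2 - 1) = 0 ∨ PySem.Int.band s (multiple * 2 - 1) = multiple) ↔
      PySem.Int.mod s multiple = 0 := by
  rcases hm with hm | hm <;> subst hm <;> norm_num <;>
    rw [PySem.Int.band_of_nonneg h (by norm_num)]
  · have h8 : s.toNat &&& (7 : Int).toNat = s.toNat % 8 :=
      Nat.and_two_pow_sub_one_eq_mod s.toNat 3
    rw [h8]; omega
  · have h16 : s.toNat &&& (15 : Int).toNat = s.toNat % 16 :=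
      Nat.and_two_pow_sub_one_eq_mod s.toNat 4
    rw [h16]; omega

-- A's generator step equals B's step-then-while (fuel off by one: A's loop steps before testing)
theorem nextFiltered_eq_bSkip (fuel : Nat) (seed factor multiple : Int)
    (hm : multiple = 4 ∨ multiple = 8) :
    nextFiltered (fuel + 1) seed factor multiple =
      bSkip fuel (PySem.Int.mod (seed * factor) 2147483647) factor multiple := by
  induction fuel generalizing seed with
  | zero =>
    simp only [nextFiltered, bSkip]
    split <;> rfl
  | succ f ih =>
    simp only [nextFiltered, bSkip]
    have hnn : 0 ≤ PySem.Int.mod (seed * factor) 2147483647 :=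
      PySem.Int.mod_nonneg _ (by norm_num)
    by_cases hc : PySem.Int.mod (PySem.Int.mod (seed * factor) 2147483647) multiple = 0
    · rw [if_pos ((mask_iff_mod _ _ hnn hm).mpr hc), if_pos hc]
    · rw [if_neg (fun h => hc ((mask_iff_mod _ _ hnn hm).mp h)), if_neg hc]
      exact ih _

-- genTake unrolled to its cons form
def genTakeC (n : Nat) (seed factor multiple : Int) : List Int :=
  match n with
  | 0 => []
  | k + 1 =>
    let s := nextFiltered 2147483648 seed factor multiple
    s :: genTakeC k s factor multiple

theorem genTakeAux_eq (n : Nat) (seed factor multiple : Int) (acc : List Int) :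
    genTakeAux n seed factor multiple acc = acc.reverse ++ genTakeC n seed factor multiple := by
  induction n generalizing seed acc with
  | zero => simp [genTakeAux, genTakeC]
  | succ k ih => simp [genTakeAux, genTakeC, ih]

theorem genTake_eq_genTakeC (n : Nat) (seed factor multiple : Int) :
    genTake n seed factor multiple = genTakeC n seed factor multiple := by
  simp [genTake, genTakeAux_eq]

-- A's zip-fold equals the per-round loop over bStep
theorem fold_eq_countLoop (comparer : Int) (n : Nat) (sa sb acc : Int) :
    (List.zip (genTakeC n sa 16807 4) (genTakeC n sb 48271 8)).foldl
      (fun acc p => acc + (if PySem.Int.band p.1 comparer = PySem.Int.band p.2 comparer then 1 else 0)) acc =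
      countLoop comparer n (sa, sb) acc := by
  induction n generalizing sa sb acc with
  | zero => rfl
  | succ k ih =>
    simp only [genTakeC, countLoop, List.zip_cons_cons, List.foldl_cons, bStep]
    rw [nextFiltered_eq_bSkip _ _ _ _ (Or.inl rfl), nextFiltered_eq_bSkip _ _ _ _ (Or.inr rfl)]
    exact ih _ _ _

-- peeling the LAST round off the counting loop
theorem countLoop_succ_last (comparer : Int) (k : Nat) (st : Int × Int) (c : Int) :
    countLoop comparer (k + 1) st c =
      countLoop comparer k st c +
        (if PySem.Int.band (bStep^[k + 1] st).1 comparer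
            = PySem.Int.band (bStep^[k + 1] st).2 comparer then 1 else 0) := by
  induction k generalizing st c with
  | zero => simp [countLoop]
  | succ k ih =>
    show countLoop comparer (k + 1) (bStep st) _ = countLoop comparer (k + 1) st c + _
    rw [ih, Function.iterate_succ_apply bStep (k + 1) st]
    rfl

theorem Cc_succ (comparer : Int) (st0 : Int × Int) (k : Nat) :
    Cc comparer st0 (k + 1) =
      Cc comparer st0 k +
        (if PySem.Int.band (Sst st0 (k + 1)).1 comparer
            = PySem.Int.band (Sst st0 (k + 1)).2 comparer then 1 else 0) := by
  unfold Cc Sst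
  exact countLoop_succ_last comparer k st0 0

-- once a state repeats, all later states repeat with the same shift
theorem Sst_shift (st0 : Int × Int) (mu lam : Nat)
    (hS : Sst st0 (mu + lam) = Sst st0 mu) (t : Nat) :
    Sst st0 (mu + lam + t) = Sst st0 (mu + t) := by
  unfold Sst at *
  rw [Nat.add_comm (mu + lam) t, Function.iterate_add_apply, hS,
      Nat.add_comm mu t, Function.iterate_add_apply]

-- the prefix-count increments repeat with the same shift
theorem Cc_shift (comparer : Int) (st0 : Int × Int) (mu lam : Nat)
    (hS : Sst st0 (mu + lam) = Sst st0 mu) (t : Nat) :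
    Cc comparer st0 (mu + lam + t) - Cc comparer st0 (mu + lam) =
      Cc comparer st0 (mu + t) - Cc comparer st0 mu := by
  induction t with
  | zero => simp
  | succ t ih =>
    have h1 := Cc_succ comparer st0 (mu + lam + t)
    have h2 := Cc_succ comparer st0 (mu + t)
    have hs := Sst_shift st0 mu lam hS (t + 1)
    rw [show mu + lam + (t + 1) = mu + lam + t + 1 by omega,
        show mu + (t + 1) = mu + t + 1 by omega] at hs
    rw [hs] at h1
    rw [show mu + lam + (t + 1) = mu + lam + t + 1 by omega,
        show mu + (t + 1) = mu + t + 1 by omega]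
    omega

-- fast-forward: q whole periods plus a remainder r
theorem Cc_fastforward (comparer : Int) (st0 : Int × Int) (mu lam : Nat)
    (hS : Sst st0 (mu + lam) = Sst st0 mu) (q r : Nat) :
    Cc comparer st0 (mu + lam + (q * lam + r)) =
      Cc comparer st0 (mu + lam)
        + (q : Int) * (Cc comparer st0 (mu + lam) - Cc comparer st0 mu)
        + (Cc comparer st0 (mu + r) - Cc comparer st0 mu) := by
  induction q with
  | zero =>
    have h := Cc_shift comparer st0 mu lam hS r
    rw [show mu + lam + (0 * lam + r) = mu + lam + r by omega]
    push_cast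
    omega
  | succ q ih =>
    have hshift := Cc_shift comparer st0 mu lam hS (lam + (q * lam + r))
    rw [show mu + (lam + (q * lam + r)) = mu + lam + (q * lam + r) by omega] at hshift
    rw [show mu + lam + ((q + 1) * lam + r) = mu + lam + (lam + (q * lam + r)) by ring]
    push_cast at ih ⊢
    linear_combination hshift + ih

-- getD on a pushed array
theorem getD_push_lt (l : Array Int) (x : Int) (j : Nat) (h : j < l.size) :
    (l.push x).getD j 0 = l.getD j 0 := by
  simp [Array.getD_eq_getD_getElem?, Array.getElem?_push, Nat.ne_of_lt h]

theorem getD_push_self (l : Array Int) (x : Int) :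
    (l.push x).getD l.size 0 = x := by
  simp [Array.getD_eq_getD_getElem?]

-- main invariant: B's memoised loop computes the n-round prefix count
theorem loopB_eq (comparer : Int) (st0 : Int × Int) (n : Nat) :
    ∀ (rem i : Nat) (seen : Std.HashMap (Int × Int) Int) (counts : Array Int),
      i + rem = n →
      counts.size = i + 1 →
      (∀ j : Nat, j ≤ i → counts.getD j 0 = Cc comparer st0 j) →
      (∀ st v, seen[st]? = some v → ∃ j : Nat, v = (j : Int) ∧ j < i ∧ Sst st0 j = st) →
      loopB comparer n rem i (Sst st0 i) seen counts = Cc comparer st0 n := by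
  intro rem
  induction rem with
  | zero =>
    intro i seen counts hin hlen hcounts hseen
    have hi : i = n := by omega
    subst hi
    simpa [loopB] using hcounts i (le_refl i)
  | succ rem ih =>
    intro i seen counts hin hlen hcounts hseen
    rw [loopB]
    cases hget : seen[Sst st0 i]? with
    | none =>
      -- advance one round
      have hstep : bStep (Sst st0 i) = Sst st0 (i + 1) := by
        unfold Sst
        rw [Function.iterate_succ_apply' bStep i st0]
      have hlen' : (counts.push (counts.getD i 0 +
          (if PySem.Int.band (Sst st0 (i + 1)).1 comparer
              = PySem.Int.band (Sst st0 (i + 1)).2 comparer then 1 else 0))).size = (i + 1) + 1 := by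
        simp [hlen]
      have hnew : counts.getD i 0 +
          (if PySem.Int.band (Sst st0 (i + 1)).1 comparer
              = PySem.Int.band (Sst st0 (i + 1)).2 comparer then 1 else 0) = Cc comparer st0 (i + 1) := by
        rw [hcounts i (le_refl i), Cc_succ]
      have hcounts' : ∀ j : Nat, j ≤ i + 1 →
          (counts.push (counts.getD i 0 +
            (if PySem.Int.band (Sst st0 (i + 1)).1 comparer
                = PySem.Int.band (Sst st0 (i + 1)).2 comparer then 1 else 0))).getD j 0 = Cc comparer st0 j := by
        intro j hj
        rcases Nat.lt_or_ge j (i + 1) with hlt | hge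
        · rw [getD_push_lt _ _ _ (by omega)]
          exact hcounts j (by omega)
        · have : j = i + 1 := by omega
          subst this
          rw [show i + 1 = counts.size from hlen.symm, getD_push_self, hlen, hnew]
      have hseen' : ∀ st v, (seen.insert (Sst st0 i) (i : Int))[st]? = some v →
          ∃ j : Nat, v = (j : Int) ∧ j < i + 1 ∧ Sst st0 j = st := by
        intro st v hv
        rw [Std.HashMap.getElem?_insert] at hv
        split at hv
        · rename_i heq
          rw [beq_iff_eq] at heq
          exact ⟨i, by cases hv; exact ⟨rfl, by omega, heq⟩⟩
        · obtain ⟨j, hj1, hj2, hj3⟩ := hseen st v hv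
          exact ⟨j, hj1, by omega, hj3⟩
      rw [hstep]
      exact ih (i + 1) _ _ (by omega) hlen' hcounts' hseen'
    | some mu =>
      obtain ⟨j, hmu, hji, hSj⟩ := hseen (Sst st0 i) mu hget
      subst hmu
      -- lam > 0, so divmod succeeds
      have hlam : ((i : Int) - (j : Int)) ≠ 0 := by omega
      have hdm : PySem.Int.divmod? ((n : Int) - (i : Int)) ((i : Int) - (j : Int)) =
          some (PySem.Int.floordiv ((n : Int) - (i : Int)) ((i : Int) - (j : Int)),
                PySem.Int.mod ((n : Int) - (i : Int)) ((i : Int) - (j : Int))) := by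
        simp [PySem.Int.divmod?, hlam]
        constructor <;> rfl
      simp only [hdm]
      set a : Int := (n : Int) - (i : Int) with ha
      set b : Int := (i : Int) - (j : Int) with hb
      have hbpos : 0 < b := by simp only [hb]; omega
      have hann : 0 ≤ a := by simp only [ha]; omega
      have hq : 0 ≤ PySem.Int.floordiv a b := by
        rw [PySem.Int.le_floordiv_iff_mul_le hbpos]
        omega
      have hr0 : 0 ≤ PySem.Int.mod a b := PySem.Int.mod_nonneg a hbpos
      have hrb : PySem.Int.mod a b < b := PySem.Int.mod_lt a hbpos
      have heq : PySem.Int.floordiv a b * b + PySem.Int.mod a b = a :=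
        PySem.Int.floordiv_mul_add_mod a b
      set q := PySem.Int.floordiv a b with hqdef
      set r := PySem.Int.mod a b with hrdef
      have hrlt : r.toNat < i - j := by omega
      have hn : n = (j + (i - j)) + (q.toNat * (i - j) + r.toNat) := by
        have h2 : q * b + r = a := heq
        have hq' : q = ((q.toNat : Nat) : Int) := by omega
        have hr' : r = ((r.toNat : Nat) : Int) := by omega
        have hb2 : b = (((i - j : Nat) : Nat) : Int) := by simp only [hb]; omega
        rw [hq', hr', hb2] at h2
        have h3 : ((q.toNat * (i - j) : Nat) : Int) + ((r.toNat : Nat) : Int) = a := by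
          push_cast at h2 ⊢
          omega
        simp only [ha] at h3
        omega
      have hS : Sst st0 (j + (i - j)) = Sst st0 j := by
        rw [show j + (i - j) = i by omega]; exact hSj.symm
      have hff := Cc_fastforward comparer st0 j (i - j) hS q.toNat r.toNat
      rw [show j + (i - j) + (q.toNat * (i - j) + r.toNat) = n by omega,
          show j + (i - j) = i by omega] at hff
      have hci : counts.getD i 0 = Cc comparer st0 i := hcounts i (le_refl i)
      have hcj : counts.getD ((j : Int) : Int).toNat 0 = Cc comparer st0 j := by
        simpa using hcounts j (by omega)
      have hcjr : counts.getD (((j : Int) + r) : Int).toNat 0 = Cc comparer st0 (j + r.toNat) := by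
        rw [show (((j : Int) + r) : Int).toNat = j + r.toNat by omega]
        exact hcounts (j + r.toNat) (by omega)
      simp only [hci, hcj, hcjr, hff]
      have hq2 : ((q.toNat : Nat) : Int) = q := by omega
      rw [hq2]
      ring

-- ===== VERDICT (by name: the statement is the Claim_ definition above) =====
theorem part2_spec : Claim_equal_part2 := by
  intro generators comparer num_rounds _
  unfold Spec_part2 part2 part2_alt
  rw [genTake_eq_genTakeC, genTake_eq_genTakeC,
      fold_eq_countLoop comparer num_rounds.toNat generators.1 generators.2 0]
  have h0 : Sst generators 0 = generators := rfl
  have h := loopB_eq comparer generators num_rounds.toNat num_rounds.toNat 0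
    ∅ #[0] (by omega) rfl
    (by intro j hj; interval_cases j; rfl)
    (by intro st v hv; simp at hv)
  rw [h0] at h
  rw [h]
  rfl
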